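-- pv_equiv track=rewrite | github.com/akabhowmick/devslopes-algo-practice | Codewars/FaultyOdometer.py | real_distance
-- ===== SOURCE A (Python) =====
-- def real_distance(n):
--     real_miles = 0
--     multiplier = 1
--
--     while n > 0:
--         digit = n % 10
--         if digit >= 4:  # Adjust for skipped '4'
--             digit -= 1
--
--         real_miles += digit * multiplier
--         multiplier *= 9
--         n //= 10
--
--     return real_miles
-- ===== SOURCE B (Python) =====
-- def real_distance(n):
--     if n <= 0:
--         return 0
--     return int(str(n).translate(str.maketrans("456789", "345678")), 9)
-- ===== Notes on version B (the rewrite author's own statement) =====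
-- stated objective: idiomatic
-- what changed: B has no loop at all: it rewrites the decimal string with a character translation table (each digit above 4 shifted down, '4' mapped to '3') and hands the result to the built-in base-9 parser int(s, 9), instead of A's explicit least-significant-digit while-loop maintaining a power-of-9 multiplier.
import Mathlib
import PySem

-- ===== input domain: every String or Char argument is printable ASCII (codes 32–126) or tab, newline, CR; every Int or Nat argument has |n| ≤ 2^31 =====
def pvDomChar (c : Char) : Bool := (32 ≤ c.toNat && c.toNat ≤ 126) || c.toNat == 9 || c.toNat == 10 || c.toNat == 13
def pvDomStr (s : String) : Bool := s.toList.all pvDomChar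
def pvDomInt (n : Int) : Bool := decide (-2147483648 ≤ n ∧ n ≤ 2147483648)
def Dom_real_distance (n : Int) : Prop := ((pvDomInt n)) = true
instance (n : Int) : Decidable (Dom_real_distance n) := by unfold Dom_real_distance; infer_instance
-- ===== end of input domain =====

-- B replaces A's explicit power-of-9 digit loop by a loop-free pipeline: translate the decimal
-- string through a fixed digit table and parse it with the base-9 int builtin (objective: idiomatic).

-- ===== PORT A =====
-- while n > 0: digit = n % 10; adjust; real += digit*mult; mult *= 9; n //= 10
def realDistanceLoop (n real_miles multiplier : Int) : Int :=
  if h : n > 0 then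
    let digit := PySem.Int.mod n 10
    let digit := if digit ≥ 4 then digit - 1 else digit
    realDistanceLoop (PySem.Int.floordiv n 10) (real_miles + digit * multiplier) (multiplier * 9)
  else real_miles
termination_by n.toNat
decreasing_by
  have : PySem.Int.floordiv n 10 = n / 10 := by
    simp [PySem.Int.floordiv, Int.fdiv_eq_ediv]
  rw [this]; omega

def real_distance (n : Int) : Int := realDistanceLoop n 0 1

-- ===== PORT B =====
-- str.translate with str.maketrans("456789", "345678"): a per-character table lookup
def pvTr (c : Char) : Char :=
  match c with
  | '4' => '3' | '5' => '4' | '6' => '5' | '7' => '6' | '8' => '7' | '9' => '8'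
  | _ => c

-- int(s, 9), hand port of the builtin, exact on the strings B feeds it
-- (non-empty, characters '0'-'8' only)
def pvParse9 (cs : List Char) : Int :=
  cs.foldl (fun acc c => acc * 9 + ((c.toNat - '0'.toNat : Nat) : Int)) 0

def real_distance_alt (n : Int) : Int :=
  if n ≤ 0 then 0
  else pvParse9 ((PySem.Int.toStr n).toList.map pvTr)

-- ===== PRECONDITION & SPEC =====
def Spec_real_distance (n : Int) (out : Int) : Prop := out = real_distance_alt n
instance (n : Int) (out : Int) : Decidable (Spec_real_distance n out) := by unfold Spec_real_distance; infer_instance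

-- ===== CLAIM (what is proved, stated in full; the proofs are below) =====
def Claim_equal_real_distance : Prop := ∀ (n : Int), Dom_real_distance n → Spec_real_distance n (real_distance n)

-- ===== LEMMAS AND PROOFS =====

-- adjusted digit
def pvAdj (d : Int) : Int := if d ≥ 4 then d - 1 else d

-- mathematical value both programs compute, recursion on the digit count
def pvVal (m : Nat) : Int :=
  if m = 0 then 0 else pvVal (m / 10) * 9 + pvAdj (m % 10 : Nat)
decreasing_by omega

theorem pvVal_zero : pvVal 0 = 0 := by simp [pvVal]

theorem pvVal_pos (m : Nat) (h : m ≠ 0) :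
    pvVal m = pvVal (m / 10) * 9 + pvAdj (m % 10 : Nat) := by
  rw [pvVal]; simp [h]

-- ---- A-side: the loop computes real + mult * pvVal ----

theorem floordiv_ten (n : Int) : PySem.Int.floordiv n 10 = n / 10 := by
  simp [PySem.Int.floordiv, Int.fdiv_eq_ediv]

theorem mod_ten (n : Int) : PySem.Int.mod n 10 = n % 10 := by
  simp [PySem.Int.mod, Int.fmod_eq_emod]

theorem loop_eq (k : Nat) : ∀ (n real mult : Int), n.toNat = k → 0 ≤ n →
    realDistanceLoop n real mult = real + mult * pvVal n.toNat := by
  induction k using Nat.strong_induction_on with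
  | _ k ih =>
    intro n real mult hk hn
    rw [realDistanceLoop]
    by_cases h : n > 0
    · simp only [h, dif_pos]
      have hd : (0:Int) ≤ n / 10 := by omega
      have hlt : (n / 10).toNat < k := by omega
      rw [floordiv_ten n, ih _ hlt _ _ _ rfl hd]
      have h1 : (n / 10).toNat = n.toNat / 10 := by omega
      have h2 : PySem.Int.mod n 10 = ((n.toNat % 10 : Nat) : Int) := by
        rw [mod_ten n]; omega
      rw [pvVal_pos n.toNat (by omega), h1, h2, pvAdj]
      ring
    · simp only [h, dif_neg, not_false_iff]
      have : n.toNat = 0 := by omega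
      rw [this, pvVal_zero]; ring

theorem a_eq_val (n : Int) (h : 0 ≤ n) : real_distance n = pvVal n.toNat := by
  have := loop_eq n.toNat n 0 1 rfl h
  simpa [real_distance] using this

-- ---- B-side: Nat.toDigits facts ----

theorem toDigitsCore_acc (b : Nat) :
    ∀ (f n : Nat) (ds : List Char),
      Nat.toDigitsCore b f n ds = Nat.toDigitsCore b f n [] ++ ds := by
  intro f
  induction f with
  | zero => intro n ds; simp [Nat.toDigitsCore]
  | succ f ih =>
    intro n ds
    simp only [Nat.toDigitsCore]
    by_cases h : n / b = 0
    · simp [h]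
    · simp only [h, if_false]
      rw [ih (n / b) ((n % b).digitChar :: ds), ih (n / b) [(n % b).digitChar]]
      simp

theorem toDigitsCore_fuel (b : Nat) (hb : 2 ≤ b) :
    ∀ (f₁ f₂ n : Nat) (ds : List Char), n < f₁ → n < f₂ →
      Nat.toDigitsCore b f₁ n ds = Nat.toDigitsCore b f₂ n ds := by
  intro f₁
  induction f₁ with
  | zero => intro f₂ n ds h1 h2; omega
  | succ f₁ ih =>
    intro f₂ n ds h1 h2
    cases f₂ with
    | zero => omega
    | succ f₂ =>
      simp only [Nat.toDigitsCore]
      by_cases h : n / b = 0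
      · simp [h]
      · simp only [h, if_false]
        have hn : 1 ≤ n := by
          rcases Nat.eq_zero_or_pos n with h0 | h0
          · subst h0; simp at h
          · exact h0
        have hdb : n / b < n := Nat.div_lt_self (by omega) (by omega)
        exact ih f₂ (n / b) _ (by omega) (by omega)

theorem toDigits_split (m : Nat) (h : 10 ≤ m) :
    Nat.toDigits 10 m = Nat.toDigits 10 (m / 10) ++ [(m % 10).digitChar] := by
  have hnd : m / 10 ≠ 0 := by omega
  rw [Nat.toDigits, Nat.toDigitsCore]
  simp only [hnd, if_false]
  rw [toDigitsCore_fuel 10 (by norm_num) m (m / 10 + 1) (m / 10) _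
        (by have := Nat.div_lt_self (by omega : 0 < m) (by norm_num : 1 < 10); omega)
        (by omega),
      toDigitsCore_acc 10]
  rfl

theorem toDigits_small (m : Nat) (h : m < 10) :
    Nat.toDigits 10 m = [m.digitChar] := by
  interval_cases m <;> rfl

-- one translated digit character, read in base 9, is the adjusted digit
theorem tr_digit (r : Int) (d : Nat) (h : d < 10) :
    r * 9 + (((pvTr d.digitChar).toNat - '0'.toNat : Nat) : Int) = r * 9 + pvAdj (d : Int) := by
  interval_cases d <;> simp [pvTr, pvAdj] <;> rfl

-- translate-then-parse over the digits of m equals pvVal m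
theorem b_eq_val (k : Nat) : ∀ m : Nat, m = k → m ≠ 0 →
    pvParse9 ((Nat.toDigits 10 m).map pvTr) = pvVal m := by
  induction k using Nat.strong_induction_on with
  | _ k ih =>
    intro m hm hne
    by_cases h : m < 10
    · rw [toDigits_small m h]
      simp only [List.map_cons, List.map_nil, pvParse9, List.foldl_cons, List.foldl_nil]
      rw [tr_digit 0 m h, pvVal_pos m hne]
      have h1 : m / 10 = 0 := by omega
      rw [h1, Nat.mod_eq_of_lt h, pvVal_zero]
    · rw [toDigits_split m (by omega)]
      simp only [List.map_append, List.map_cons, List.map_nil, pvParse9,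
        List.foldl_append, List.foldl_cons, List.foldl_nil]
      have := ih (m / 10) (by omega) (m / 10) rfl (by omega)
      simp only [pvParse9] at this
      rw [this, tr_digit _ (m % 10) (by omega), pvVal_pos m hne]

-- ===== VERDICT (by name: the statement is the Claim_ definition above) =====
theorem real_distance_spec : Claim_equal_real_distance := by
  intro n _
  unfold Spec_real_distance real_distance_alt
  by_cases h : n ≤ 0
  · simp only [h, if_pos]
    rw [real_distance, realDistanceLoop]
    simp; omega
  · simp only [h, if_neg, not_false_iff]
    have hpos : 0 < n := by omega
    rw [a_eq_val n (le_of_lt hpos)]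
    have hs : (PySem.Int.toStr n).toList = Nat.toDigits 10 n.toNat := by
      rw [PySem.Int.toList_toStr, PySem.Int.toChars]
      simp [not_lt_of_gt hpos]
    rw [hs, b_eq_val n.toNat n.toNat rfl (by omega)]
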